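-- pv_equiv track=rewrite | github.com/Huzum1/Generatorwebsite | App.py | analyze_cold_streak
-- ===== SOURCE A (Python) =====
-- def analyze_cold_streak(rounds, max_num):
--     cold_streak = {}
--     all_nums = set(range(1, max_num + 1))
--     for num in all_nums:
--         age = 0
--         for round_nums in reversed(rounds):
--             if num in round_nums:
--                 break
--             age += 1
--         cold_streak[num] = age
--     return dict(sorted(cold_streak.items(), key=lambda x: x[1], reverse=True))
-- ===== SOURCE B (Python) =====
-- def analyze_cold_streak(rounds, max_num):
--     n = len(rounds)
--     first = {}
--     for age, round_nums in enumerate(reversed(rounds)):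
--         for num in round_nums:
--             first.setdefault(num, age)
--     items = [(num, first.get(num, n)) for num in range(1, max_num + 1)]
--     items.sort(key=lambda x: x[1], reverse=True)
--     return dict(items)
-- ===== Notes on version B (the rewrite author's own statement) =====
-- stated objective: faster
-- what changed: A scans all rounds from the end once per number (max_num nested scans); B makes a single reverse pass over the rounds recording each number's first-appearance age in a dict, then looks each number up once.
import Mathlib
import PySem

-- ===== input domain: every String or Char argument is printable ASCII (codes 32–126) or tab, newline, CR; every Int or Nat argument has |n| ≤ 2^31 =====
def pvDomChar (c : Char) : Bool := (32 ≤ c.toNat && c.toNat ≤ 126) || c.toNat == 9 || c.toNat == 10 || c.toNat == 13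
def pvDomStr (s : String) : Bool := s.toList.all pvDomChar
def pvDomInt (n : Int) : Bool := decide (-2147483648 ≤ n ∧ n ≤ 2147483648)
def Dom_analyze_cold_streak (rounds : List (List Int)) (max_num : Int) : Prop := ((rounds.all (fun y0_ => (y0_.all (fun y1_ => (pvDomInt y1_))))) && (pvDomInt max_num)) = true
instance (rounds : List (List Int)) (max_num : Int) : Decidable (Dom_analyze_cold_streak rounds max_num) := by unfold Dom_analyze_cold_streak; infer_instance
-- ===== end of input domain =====

-- B replaces A's per-number scan of all rounds by one reverse pass over the rounds
-- recording first-appearance ages in a dict (objective: faster, measured by the check).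

-- ===== PORT A =====
-- A's inner loop: age = 0; for round_nums in reversed(rounds): if num in round_nums: break; age += 1
def pvAgeA (num : Int) : List (List Int) → Int
  | [] => 0
  | r :: rs => if num ∈ r then 0 else pvAgeA num rs + 1

def analyze_cold_streak (rounds : List (List Int)) (max_num : Int) : List (Int × Int) :=
  -- all_nums = set(range(1, max_num + 1)); iterated in the set's element order
  let all_nums : PySem.Set Int := PySem.Set.ofList (PySem.List.pyRange 1 (max_num + 1) 1)
  let cold_streak : PySem.Dict Int Int :=
    all_nums.foldl (fun d num => d.insert num (pvAgeA num rounds.reverse)) PySem.Dict.empty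
  -- dict(sorted(cold_streak.items(), key=lambda x: x[1], reverse=True)) as an assoc list
  PySem.List.sorted cold_streak.items (fun x => x.2) true

-- ===== PORT B =====
def analyze_cold_streak_alt (rounds : List (List Int)) (max_num : Int) : List (Int × Int) :=
  let n : Int := rounds.length
  let first : PySem.Dict Int Int :=
    (PySem.List.enumerate rounds.reverse).foldl
      (fun d p => p.2.foldl (fun d num => d.setdefault num p.1) d) PySem.Dict.empty
  let items := (PySem.List.pyRange 1 (max_num + 1) 1).map (fun num => (num, first.getD num n))
  PySem.List.sorted items (fun x => x.2) true

-- ===== PRECONDITION & SPEC =====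
def Spec_analyze_cold_streak (rounds : List (List Int)) (max_num : Int) (out : List (Int × Int)) : Prop := out = analyze_cold_streak_alt rounds max_num
instance (rounds : List (List Int)) (max_num : Int) (out : List (Int × Int)) : Decidable (Spec_analyze_cold_streak rounds max_num out) := by unfold Spec_analyze_cold_streak; infer_instance

-- ===== CLAIM (what is proved, stated in full; the proofs are below) =====
def Claim_equal_analyze_cold_streak : Prop := ∀ (rounds : List (List Int)) (max_num : Int), Dom_analyze_cold_streak rounds max_num → Spec_analyze_cold_streak rounds max_num (analyze_cold_streak rounds max_num)

-- ===== LEMMAS AND PROOFS =====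

-- first-appearance age of num in revs (none if num occurs in no round)
def pvFirstAge? (num : Int) : List (List Int) → Option Int
  | [] => none
  | r :: rs => if num ∈ r then some 0 else (pvFirstAge? num rs).map (· + 1)

theorem pvAgeA_eq_firstAge (num : Int) (revs : List (List Int)) :
    pvAgeA num revs = (pvFirstAge? num revs).getD revs.length := by
  induction revs with
  | nil => rfl
  | cons r rs ih =>
    simp only [pvAgeA, pvFirstAge?, List.length_cons]
    by_cases h : num ∈ r
    · simp [h]
    · simp only [h, if_false]
      cases hf : pvFirstAge? num rs <;> simp [ih, hf]

theorem setdefault_round (r : List Int) (d : PySem.Dict Int Int) (a k : Int) :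
    (r.foldl (fun d num => d.setdefault num a) d).get? k
      = (d.get? k).orElse (fun _ => if k ∈ r then some a else none) := by
  induction r generalizing d with
  | nil => cases h : d.get? k <;> simp [Option.orElse, h]
  | cons x xs ih =>
    simp only [List.foldl_cons, ih]
    by_cases hk : k = x
    · subst hk
      by_cases hc : d.contains k
      · rw [PySem.Dict.setdefault_of_contains d a hc]
        have hs : (d.get? k).isSome := by rw [← PySem.Dict.contains_eq_isSome_get?]; exact hc
        cases h : d.get? k with
        | none => rw [h] at hs; simp at hs
        | some v => simp [Option.orElse]
      · have hc' : d.contains k = false := by simpa using hc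
        rw [PySem.Dict.setdefault_of_not_contains d a hc']
        have hn : d.get? k = none := by
          have h2 := PySem.Dict.contains_eq_isSome_get? d k
          rw [hc'] at h2
          cases h : d.get? k with
          | none => rfl
          | some v => rw [h] at h2; simp at h2
        simp [Option.orElse, PySem.Dict.get?_insert_self, hn]
    · rw [PySem.Dict.get?_setdefault_of_ne d a hk]
      congr 1
      funext u
      simp [hk]

theorem fold_enumerate_get? (revs : List (List Int)) (s : Int) (d : PySem.Dict Int Int) (k : Int) :
    ((PySem.List.enumerate revs s).foldl
        (fun d p => p.2.foldl (fun d num => d.setdefault num p.1) d) d).get? k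
      = (d.get? k).orElse (fun _ => (pvFirstAge? k revs).map (s + ·)) := by
  induction revs generalizing s d with
  | nil => cases h : d.get? k <;> simp [PySem.List.enumerate_nil, pvFirstAge?, Option.orElse, h]
  | cons r rs ih =>
    rw [PySem.List.enumerate_cons, List.foldl_cons, ih, setdefault_round]
    simp only [pvFirstAge?]
    by_cases h : k ∈ r
    · cases hd : d.get? k <;> simp [h, Option.orElse]
    · simp only [h, if_false]
      cases hd : d.get? k with
      | some v => simp [Option.orElse]
      | none =>
        simp only [Option.orElse]
        cases hf : pvFirstAge? k rs with
        | none => simp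
        | some v => simp; ring_nf

theorem items_A (rounds : List (List Int)) (max_num : Int) :
    ((PySem.Set.ofList (PySem.List.pyRange 1 (max_num + 1) 1)).foldl
        (fun d num => d.insert num (pvAgeA num rounds.reverse)) PySem.Dict.empty).items
      = (PySem.List.pyRange 1 (max_num + 1) 1).map
          (fun num => (num, pvAgeA num rounds.reverse)) := by
  rw [PySem.Set.ofList_eq_self_of_nodup _ (PySem.List.nodup_pyRange_one _ _)]
  rw [PySem.Dict.items_foldl_insert_fresh (PySem.List.pyRange 1 (max_num + 1) 1)
      (fun x => x) (fun num => pvAgeA num rounds.reverse) PySem.Dict.empty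
      (fun a _ => PySem.Dict.contains_empty a)
      (by simpa using PySem.List.nodup_pyRange_one 1 (max_num + 1))]
  rfl

theorem analyze_cold_streak_eq (rounds : List (List Int)) (max_num : Int) :
    analyze_cold_streak rounds max_num = analyze_cold_streak_alt rounds max_num := by
  unfold analyze_cold_streak analyze_cold_streak_alt
  simp only [items_A]
  congr 1
  apply List.map_congr_left
  intro num _
  congr 1
  have h := fold_enumerate_get? rounds.reverse 0 PySem.Dict.empty num
  rw [PySem.Dict.getD_eq_get?_getD, h]
  simp only [PySem.Dict.get?_empty, Option.orElse]
  rw [pvAgeA_eq_firstAge]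
  cases hf : pvFirstAge? num rounds.reverse <;> simp [List.length_reverse]

-- ===== VERDICT (by name: the statement is the Claim_ definition above) =====
theorem analyze_cold_streak_spec : Claim_equal_analyze_cold_streak := by
  intro rounds max_num _
  unfold Spec_analyze_cold_streak
  exact analyze_cold_streak_eq rounds max_num
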